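-- pv_equiv track=rewrite | github.com/alpuema/traffic_test | .history/examples/simple_aco_optimization_20250827212110.py | create_mock_grid_categories
-- ===== SOURCE A (Python) =====
-- def create_mock_grid_categories(grid_size):
--     """Create mock edge categories for heatmap simulation.
--
--     For a 4x4 grid, coordinates are:
--     (0,0) (1,0) (2,0) (3,0)
--     (0,1) (1,1) (2,1) (3,1)
--     (0,2) (1,2) (2,2) (3,2)
--     (0,3) (1,3) (2,3) (3,3)
--     """
--
--     categories = {
--         'all': [],
--         'perimeter': [],
--         'center': [],
--         'left_edge': [],
--         'right_edge': [],
--         'top_edge': [],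
--         'bottom_edge': []
--     }
--
--     # Generate coordinates for each category
--     for x in range(grid_size):
--         for y in range(grid_size):
--             coord = (x, y)
--             categories['all'].append(coord)
--
--             # Perimeter vs center classification
--             if x == 0 or x == grid_size-1 or y == 0 or y == grid_size-1:
--                 categories['perimeter'].append(coord)
--             else:
--                 categories['center'].append(coord)
--
--             # Edge-specific classifications for industrial pattern
--             if x == 0:  # Leftmost column
--                 categories['left_edge'].append(coord)
--             if x == grid_size - 1:  # Rightmost column
--                 categories['right_edge'].append(coord)
--             if y == 0:  # Top row
--                 categories['top_edge'].append(coord)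
--             if y == grid_size - 1:  # Bottom row
--                 categories['bottom_edge'].append(coord)
--
--     return categories
-- ===== SOURCE B (Python) =====
-- def create_mock_grid_categories(grid_size):
--     """Create mock edge categories for heatmap simulation.
--
--     Output-directed construction: instead of scanning every cell and testing
--     boundary predicates, each category is assembled directly from its geometry:
--     the perimeter is the first column, plus the two boundary cells of each
--     middle column, plus the last column; the center is the inner (n-2)x(n-2)
--     block; each edge is written down as its own line of cells.
--     """
--     n = grid_size
--     m = n - 1
--
--     def col(x):
--         return [(x, y) for y in range(n)]
--
--     perimeter = (col(0)
--                  + [c for x in range(1, m) for c in ((x, 0), (x, m))]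
--                  + (col(m) if m > 0 else []))
--     return {
--         'all': [c for x in range(n) for c in col(x)],
--         'perimeter': perimeter,
--         'center': [(x, y) for x in range(1, m) for y in range(1, m)],
--         'left_edge': col(0),
--         'right_edge': [(m, y) for y in range(n)],
--         'top_edge': [(x, 0) for x in range(n)],
--         'bottom_edge': [(x, m) for x in range(n)],
--     }
-- ===== Notes on version B (the rewrite author's own statement) =====
-- stated objective: alternative
-- what changed: A scans all n^2 cells and classifies each with boundary predicates; B never tests a predicate: perimeter is assembled geometrically as first column + the two boundary cells of each middle column + last column, center is generated directly as the inner (n-2)x(n-2) block, and each edge is written down as its own line, so every category except 'all' is built in time proportional to its own size.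
import Mathlib
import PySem

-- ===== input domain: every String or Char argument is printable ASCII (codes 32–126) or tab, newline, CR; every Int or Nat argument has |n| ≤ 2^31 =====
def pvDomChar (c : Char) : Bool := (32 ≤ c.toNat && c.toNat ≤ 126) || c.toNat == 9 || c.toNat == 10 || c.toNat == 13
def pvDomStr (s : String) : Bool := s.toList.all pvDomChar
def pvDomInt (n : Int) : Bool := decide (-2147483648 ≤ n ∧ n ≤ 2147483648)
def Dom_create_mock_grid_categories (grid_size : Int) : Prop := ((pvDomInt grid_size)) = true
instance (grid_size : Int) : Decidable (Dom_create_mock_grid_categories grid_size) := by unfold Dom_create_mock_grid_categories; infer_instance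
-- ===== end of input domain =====

-- B replaces A's cell-by-cell predicate scan by output-directed geometric construction:
-- perimeter = first column ++ boundary pair of each middle column ++ last column,
-- center = the inner (n-2)x(n-2) block, each edge written down as its own line (objective: alternative).

-- ===== PORT A =====
-- one y-iteration of A's nested loop: the conditional appends on the categories dict
def pvInnerA (n x : Int) (d : PySem.Dict String (List (Int × Int))) (y : Int) :
    PySem.Dict String (List (Int × Int)) :=
  let coord := (x, y)
  let d := d.modify "all" [] (· ++ [coord])
  let d := if x == 0 || x == n - 1 || y == 0 || y == n - 1
           then d.modify "perimeter" [] (· ++ [coord])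
           else d.modify "center" [] (· ++ [coord])
  let d := if x == 0 then d.modify "left_edge" [] (· ++ [coord]) else d
  let d := if x == n - 1 then d.modify "right_edge" [] (· ++ [coord]) else d
  let d := if y == 0 then d.modify "top_edge" [] (· ++ [coord]) else d
  if y == n - 1 then d.modify "bottom_edge" [] (· ++ [coord]) else d

def create_mock_grid_categories (grid_size : Int) : List (String × List (Int × Int)) :=
  ((PySem.List.pyRange 0 grid_size 1).foldl
      (fun d x => (PySem.List.pyRange 0 grid_size 1).foldl (pvInnerA grid_size x) d)
      (PySem.Dict.mk [("all", []), ("perimeter", []), ("center", []), ("left_edge", []),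
                      ("right_edge", []), ("top_edge", []), ("bottom_edge", [])])).items

-- ===== PORT B =====
-- col(x) = [(x, y) for y in range(n)]
def pvCol (n x : Int) : List (Int × Int) :=
  (PySem.List.pyRange 0 n 1).map (fun y => (x, y))

def create_mock_grid_categories_alt (grid_size : Int) : List (String × List (Int × Int)) :=
  [("all", (PySem.List.pyRange 0 grid_size 1).flatMap (fun x => pvCol grid_size x)),
   ("perimeter",
      pvCol grid_size 0
        ++ (PySem.List.pyRange 1 (grid_size - 1) 1).flatMap
             (fun x => [(x, (0 : Int)), (x, grid_size - 1)])
        ++ (if 0 < grid_size - 1 then pvCol grid_size (grid_size - 1) else [])),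
   ("center", (PySem.List.pyRange 1 (grid_size - 1) 1).flatMap
      (fun x => (PySem.List.pyRange 1 (grid_size - 1) 1).map (fun y => (x, y)))),
   ("left_edge", pvCol grid_size 0),
   ("right_edge", (PySem.List.pyRange 0 grid_size 1).map (fun y => (grid_size - 1, y))),
   ("top_edge", (PySem.List.pyRange 0 grid_size 1).map (fun x => (x, (0 : Int)))),
   ("bottom_edge", (PySem.List.pyRange 0 grid_size 1).map (fun x => (x, grid_size - 1)))]

-- ===== PRECONDITION & SPEC =====
def Spec_create_mock_grid_categories (grid_size : Int) (out : List (String × List (Int × Int))) : Prop := out = create_mock_grid_categories_alt grid_size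
instance (grid_size : Int) (out : List (String × List (Int × Int))) : Decidable (Spec_create_mock_grid_categories grid_size out) := by unfold Spec_create_mock_grid_categories; infer_instance

-- ===== CLAIM (what is proved, stated in full; the proofs are below) =====
def Claim_equal_create_mock_grid_categories : Prop := ∀ (grid_size : Int), Dom_create_mock_grid_categories grid_size → Spec_create_mock_grid_categories grid_size (create_mock_grid_categories grid_size)

-- ===== LEMMAS AND PROOFS =====

-- the categories dict with its seven fixed keys, as a function of the seven lists
def mk7 (a p c l r t b : List (Int × Int)) : PySem.Dict String (List (Int × Int)) :=
  PySem.Dict.mk [("all", a), ("perimeter", p), ("center", c), ("left_edge", l),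
                 ("right_edge", r), ("top_edge", t), ("bottom_edge", b)]

theorem mod_all (a p c l r t b : List (Int × Int)) (v : Int × Int) :
    (mk7 a p c l r t b).modify "all" [] (· ++ [v]) = mk7 (a ++ [v]) p c l r t b := by
  simp [mk7, PySem.Dict.modify, PySem.Dict.insert, PySem.Dict.getD, PySem.Dict.get?]

theorem mod_per (a p c l r t b : List (Int × Int)) (v : Int × Int) :
    (mk7 a p c l r t b).modify "perimeter" [] (· ++ [v]) = mk7 a (p ++ [v]) c l r t b := by
  simp [mk7, PySem.Dict.modify, PySem.Dict.insert, PySem.Dict.getD, PySem.Dict.get?]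

theorem mod_cen (a p c l r t b : List (Int × Int)) (v : Int × Int) :
    (mk7 a p c l r t b).modify "center" [] (· ++ [v]) = mk7 a p (c ++ [v]) l r t b := by
  simp [mk7, PySem.Dict.modify, PySem.Dict.insert, PySem.Dict.getD, PySem.Dict.get?]

theorem mod_left (a p c l r t b : List (Int × Int)) (v : Int × Int) :
    (mk7 a p c l r t b).modify "left_edge" [] (· ++ [v]) = mk7 a p c (l ++ [v]) r t b := by
  simp [mk7, PySem.Dict.modify, PySem.Dict.insert, PySem.Dict.getD, PySem.Dict.get?]

theorem mod_right (a p c l r t b : List (Int × Int)) (v : Int × Int) :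
    (mk7 a p c l r t b).modify "right_edge" [] (· ++ [v]) = mk7 a p c l (r ++ [v]) t b := by
  simp [mk7, PySem.Dict.modify, PySem.Dict.insert, PySem.Dict.getD, PySem.Dict.get?]

theorem mod_top (a p c l r t b : List (Int × Int)) (v : Int × Int) :
    (mk7 a p c l r t b).modify "top_edge" [] (· ++ [v]) = mk7 a p c l r (t ++ [v]) b := by
  simp [mk7, PySem.Dict.modify, PySem.Dict.insert, PySem.Dict.getD, PySem.Dict.get?]

theorem mod_bot (a p c l r t b : List (Int × Int)) (v : Int × Int) :
    (mk7 a p c l r t b).modify "bottom_edge" [] (· ++ [v]) = mk7 a p c l r t (b ++ [v]) := by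
  simp [mk7, PySem.Dict.modify, PySem.Dict.insert, PySem.Dict.getD, PySem.Dict.get?]

theorem pvInnerA_mk7 (n x y : Int) (a p c l r t b : List (Int × Int)) :
    pvInnerA n x (mk7 a p c l r t b) y =
    mk7 (a ++ [(x, y)])
        (if x == 0 || x == n - 1 || y == 0 || y == n - 1 then p ++ [(x, y)] else p)
        (if x == 0 || x == n - 1 || y == 0 || y == n - 1 then c else c ++ [(x, y)])
        (if x == 0 then l ++ [(x, y)] else l)
        (if x == n - 1 then r ++ [(x, y)] else r)
        (if y == 0 then t ++ [(x, y)] else t)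
        (if y == n - 1 then b ++ [(x, y)] else b) := by
  simp only [pvInnerA]
  split_ifs <;>
    simp_all [mod_all, mod_per, mod_cen, mod_left, mod_right, mod_top, mod_bot]

theorem foldl_inner (n x : Int) (ys : List Int) :
    ∀ a p c l r t b : List (Int × Int),
    ys.foldl (pvInnerA n x) (mk7 a p c l r t b) =
    mk7 (a ++ ys.map (fun y => (x, y)))
        (p ++ (ys.filter (fun y => x == 0 || x == n - 1 || y == 0 || y == n - 1)).map (fun y => (x, y)))
        (c ++ (ys.filter (fun y => !(x == 0 || x == n - 1 || y == 0 || y == n - 1))).map (fun y => (x, y)))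
        (l ++ (if x == 0 then ys.map (fun y => (x, y)) else []))
        (r ++ (if x == n - 1 then ys.map (fun y => (x, y)) else []))
        (t ++ (ys.filter (fun y => y == 0)).map (fun y => (x, y)))
        (b ++ (ys.filter (fun y => y == n - 1)).map (fun y => (x, y))) := by
  induction ys with
  | nil => intro a p c l r t b; simp
  | cons y ys ih =>
      intro a p c l r t b
      rw [List.foldl_cons, pvInnerA_mk7, ih]
      simp only [List.map_cons, List.filter_cons]
      split_ifs <;> simp_all

theorem foldl_outer (n : Int) (ys : List Int) (xs : List Int) :
    ∀ a p c l r t b : List (Int × Int),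
    xs.foldl (fun d x => ys.foldl (pvInnerA n x) d) (mk7 a p c l r t b) =
    mk7 (a ++ xs.flatMap (fun x => ys.map (fun y => (x, y))))
        (p ++ xs.flatMap (fun x => (ys.filter (fun y => x == 0 || x == n - 1 || y == 0 || y == n - 1)).map (fun y => (x, y))))
        (c ++ xs.flatMap (fun x => (ys.filter (fun y => !(x == 0 || x == n - 1 || y == 0 || y == n - 1))).map (fun y => (x, y))))
        (l ++ xs.flatMap (fun x => if x == 0 then ys.map (fun y => (x, y)) else []))
        (r ++ xs.flatMap (fun x => if x == n - 1 then ys.map (fun y => (x, y)) else []))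
        (t ++ xs.flatMap (fun x => (ys.filter (fun y => y == 0)).map (fun y => (x, y))))
        (b ++ xs.flatMap (fun x => (ys.filter (fun y => y == n - 1)).map (fun y => (x, y)))) := by
  induction xs with
  | nil => intro a p c l r t b; simp
  | cons x xs ih =>
      intro a p c l r t b
      rw [List.foldl_cons, foldl_inner, ih]
      simp [List.flatMap_cons]

-- a nodup list triggers a conditional block keyed on one element exactly once
theorem flatMap_if_beq {β : Type} (xs : List Int) (hnd : xs.Nodup) (a0 : Int) (g : Int → List β) :
    xs.flatMap (fun x => if x == a0 then g x else []) = if a0 ∈ xs then g a0 else [] := by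
  induction xs with
  | nil => simp
  | cons x xs ih =>
      simp only [List.nodup_cons] at hnd
      by_cases hx : x = a0
      · subst hx
        rw [List.flatMap_cons, if_pos (by simp), ih hnd.2, if_neg hnd.1,
            if_pos List.mem_cons_self, List.append_nil]
      · rw [List.flatMap_cons, if_neg (by simp [hx]), ih hnd.2, List.nil_append]
        by_cases hm : a0 ∈ xs
        · rw [if_pos hm, if_pos (List.mem_cons_of_mem _ hm)]
        · rw [if_neg hm, if_neg (by simp [hm, Ne.symm hx])]

theorem pyRange_nil_of_nonpos (n : Int) (h : n ≤ 0) : PySem.List.pyRange 0 n 1 = [] :=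
  PySem.List.pyRange_one_eq_nil h

-- split range(n) into [0] ++ range(1, n-1) ++ [n-1] for n ≥ 2
theorem range_split (n : Int) (h : 2 ≤ n) :
    PySem.List.pyRange 0 n 1 = 0 :: (PySem.List.pyRange 1 (n - 1) 1 ++ [n - 1]) := by
  rw [PySem.List.pyRange_one_cons (by omega)]
  congr 1
  have := PySem.List.pyRange_one_succ_right (a := 1) (b := n - 1) (by omega)
  simpa using this

theorem mem_mid {n x : Int} (_h : 2 ≤ n) (hx : x ∈ PySem.List.pyRange 1 (n - 1) 1) :
    x ≠ 0 ∧ x ≠ n - 1 := by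
  rw [PySem.List.mem_pyRange_one] at hx; omega

theorem flatMap_congr_mem {α β : Type} (xs : List α) (f g : α → List β)
    (h : ∀ x ∈ xs, f x = g x) : xs.flatMap f = xs.flatMap g := by
  induction xs with
  | nil => rfl
  | cons x xs ih =>
      rw [List.flatMap_cons, List.flatMap_cons, h x (by simp), ih (fun y hy => h y (by simp [hy]))]

-- filter (y == 0 || y == n-1) over range(n) is [0, n-1] for n ≥ 2
theorem filter_boundary (n : Int) (h : 2 ≤ n) :
    (PySem.List.pyRange 0 n 1).filter (fun y => y == 0 || y == n - 1) = [0, n - 1] := by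
  rw [range_split n h]
  rw [List.filter_cons_of_pos (by simp), List.filter_append]
  rw [List.filter_eq_nil_iff.mpr (by
    intro y hy
    have := mem_mid h hy
    simp [this.1, this.2])]
  simp

-- filter !(y == 0 || y == n-1) over range(n) is range(1, n-1) for n ≥ 2
theorem filter_inner (n : Int) (h : 2 ≤ n) :
    (PySem.List.pyRange 0 n 1).filter (fun y => !(y == 0 || y == n - 1)) =
    PySem.List.pyRange 1 (n - 1) 1 := by
  rw [range_split n h]
  rw [List.filter_cons_of_neg (by simp), List.filter_append]
  rw [List.filter_eq_self.mpr (by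
    intro y hy
    have := mem_mid h hy
    simp [this.1, this.2])]
  simp

theorem comp_all (n : Int) :
    (PySem.List.pyRange 0 n 1).flatMap (fun x => (PySem.List.pyRange 0 n 1).map (fun y => (x, y)))
    = (PySem.List.pyRange 0 n 1).flatMap (fun x => pvCol n x) := rfl

theorem comp_perimeter (n : Int) :
    (PySem.List.pyRange 0 n 1).flatMap
      (fun x => ((PySem.List.pyRange 0 n 1).filter
        (fun y => x == 0 || x == n - 1 || y == 0 || y == n - 1)).map (fun y => (x, y)))
    = pvCol n 0
        ++ (PySem.List.pyRange 1 (n - 1) 1).flatMap (fun x => [(x, (0 : Int)), (x, n - 1)])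
        ++ (if 0 < n - 1 then pvCol n (n - 1) else []) := by
  by_cases h2 : 2 ≤ n
  · rw [if_pos (by omega), List.append_assoc]
    nth_rewrite 2 [range_split n h2]
    rw [List.flatMap_cons, List.flatMap_append, List.flatMap_cons, List.flatMap_nil,
        List.append_nil]
    congr 1
    · rw [List.filter_eq_self.mpr (by intro y _; simp)]; rfl
    congr 1
    · exact flatMap_congr_mem _ _ _ (fun x hx => by
        have hm := mem_mid h2 hx
        rw [List.filter_congr (q := fun y => y == 0 || y == n - 1)
              (by intro y _; rw [show (x == (0:Int)) = false from beq_eq_false_iff_ne.mpr hm.1,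
                   show (x == n - 1) = false from beq_eq_false_iff_ne.mpr hm.2]; simp),
            filter_boundary n h2]
        rfl)
    · rw [List.filter_eq_self.mpr (by intro y _; simp)]; rfl
  · by_cases h1 : n = 1
    · subst h1; decide
    · rw [pyRange_nil_of_nonpos n (by omega),
          PySem.List.pyRange_one_eq_nil (a := 1) (by omega), if_neg (by omega)]
      simp [pvCol, pyRange_nil_of_nonpos n (by omega)]

theorem comp_center (n : Int) :
    (PySem.List.pyRange 0 n 1).flatMap
      (fun x => ((PySem.List.pyRange 0 n 1).filter
        (fun y => !(x == 0 || x == n - 1 || y == 0 || y == n - 1))).map (fun y => (x, y)))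
    = (PySem.List.pyRange 1 (n - 1) 1).flatMap
        (fun x => (PySem.List.pyRange 1 (n - 1) 1).map (fun y => (x, y))) := by
  by_cases h2 : 2 ≤ n
  · nth_rewrite 2 [range_split n h2]
    rw [List.flatMap_cons, List.flatMap_append, List.flatMap_cons, List.flatMap_nil,
        List.append_nil]
    rw [List.filter_eq_nil_iff.mpr (by intro y _; simp), List.map_nil, List.nil_append]
    rw [List.filter_eq_nil_iff.mpr (by intro y _; simp), List.map_nil, List.append_nil]
    exact flatMap_congr_mem _ _ _ (fun x hx => by
      have hm := mem_mid h2 hx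
      rw [List.filter_congr (q := fun y => !(y == 0 || y == n - 1))
            (by intro y _; rw [show (x == (0:Int)) = false from beq_eq_false_iff_ne.mpr hm.1,
                   show (x == n - 1) = false from beq_eq_false_iff_ne.mpr hm.2]; simp),
          filter_inner n h2])
  · by_cases h1 : n = 1
    · subst h1; decide
    · rw [pyRange_nil_of_nonpos n (by omega),
          PySem.List.pyRange_one_eq_nil (a := 1) (by omega)]
      rfl

theorem comp_left (n : Int) :
    (PySem.List.pyRange 0 n 1).flatMap
      (fun x => if x == 0 then (PySem.List.pyRange 0 n 1).map (fun y => (x, y)) else [])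
    = pvCol n 0 := by
  rw [flatMap_if_beq _ (PySem.List.nodup_pyRange_one 0 n) 0]
  by_cases hn : 0 < n
  · rw [if_pos (PySem.List.mem_pyRange_one.mpr ⟨le_refl 0, hn⟩)]; rfl
  · rw [if_neg (by rw [PySem.List.mem_pyRange_one]; omega)]
    simp [pvCol, pyRange_nil_of_nonpos n (by omega)]

theorem comp_right (n : Int) :
    (PySem.List.pyRange 0 n 1).flatMap
      (fun x => if x == n - 1 then (PySem.List.pyRange 0 n 1).map (fun y => (x, y)) else [])
    = (PySem.List.pyRange 0 n 1).map (fun y => (n - 1, y)) := by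
  rw [flatMap_if_beq _ (PySem.List.nodup_pyRange_one 0 n) (n - 1)]
  by_cases hn : 0 < n
  · rw [if_pos (PySem.List.mem_pyRange_one.mpr ⟨by omega, by omega⟩)]
  · rw [if_neg (by rw [PySem.List.mem_pyRange_one]; omega)]
    simp [pyRange_nil_of_nonpos n (by omega)]

theorem filter_beq_nodup (xs : List Int) (hnd : xs.Nodup) (a0 : Int) :
    xs.filter (fun y => y == a0) = if a0 ∈ xs then [a0] else [] := by
  induction xs with
  | nil => simp
  | cons x xs ih =>
      simp only [List.nodup_cons] at hnd
      by_cases hx : x = a0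
      · subst hx
        rw [List.filter_cons_of_pos (by simp), ih hnd.2, if_neg hnd.1,
            if_pos List.mem_cons_self]
      · rw [List.filter_cons_of_neg (by simp [hx]), ih hnd.2]
        by_cases hm : a0 ∈ xs
        · rw [if_pos hm, if_pos (List.mem_cons_of_mem _ hm)]
        · rw [if_neg hm, if_neg (by simp [hm, Ne.symm hx])]

theorem comp_top (n : Int) :
    (PySem.List.pyRange 0 n 1).flatMap
      (fun x => ((PySem.List.pyRange 0 n 1).filter (fun y => y == 0)).map (fun y => (x, y)))
    = (PySem.List.pyRange 0 n 1).map (fun x => (x, (0 : Int))) := by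
  rw [filter_beq_nodup _ (PySem.List.nodup_pyRange_one 0 n) 0]
  by_cases hn : 0 < n
  · rw [if_pos (PySem.List.mem_pyRange_one.mpr ⟨le_refl 0, hn⟩)]
    simp [List.map_eq_flatMap]
  · rw [pyRange_nil_of_nonpos n (by omega)]; simp

theorem comp_bottom (n : Int) :
    (PySem.List.pyRange 0 n 1).flatMap
      (fun x => ((PySem.List.pyRange 0 n 1).filter (fun y => y == n - 1)).map (fun y => (x, y)))
    = (PySem.List.pyRange 0 n 1).map (fun x => (x, n - 1)) := by
  rw [filter_beq_nodup _ (PySem.List.nodup_pyRange_one 0 n) (n - 1)]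
  by_cases hn : 0 < n
  · rw [if_pos (PySem.List.mem_pyRange_one.mpr ⟨by omega, by omega⟩)]
    simp [List.map_eq_flatMap]
  · rw [pyRange_nil_of_nonpos n (by omega)]; simp

-- ===== VERDICT (by name: the statement is the Claim_ definition above) =====
theorem create_mock_grid_categories_spec : Claim_equal_create_mock_grid_categories := by
  intro n _
  unfold Spec_create_mock_grid_categories create_mock_grid_categories create_mock_grid_categories_alt
  have hinit : PySem.Dict.mk (κ := String) (ν := List (Int × Int))
      [("all", []), ("perimeter", []), ("center", []), ("left_edge", []),
       ("right_edge", []), ("top_edge", []), ("bottom_edge", [])] = mk7 [] [] [] [] [] [] [] := rfl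
  rw [hinit, foldl_outer]
  have hitems : ∀ a p c l r t b : List (Int × Int),
      (mk7 a p c l r t b).items = [("all", a), ("perimeter", p), ("center", c), ("left_edge", l),
        ("right_edge", r), ("top_edge", t), ("bottom_edge", b)] := fun _ _ _ _ _ _ _ => rfl
  rw [hitems]
  simp only [List.nil_append, List.cons.injEq, Prod.mk.injEq, and_true, true_and]
  exact ⟨comp_all n, comp_perimeter n, comp_center n, comp_left n, comp_right n,
         comp_top n, comp_bottom n⟩
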